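-- pv_equiv track=rewrite | github.com/GitElean/MatrizLaberitnos-DP-vs-Greedy | mLDP.py | RecorridoLaberintoPD
-- ===== SOURCE A (Python) =====
-- def RecorridoLaberintoPD(laberinto, filaInicial, columnaInicial, filaFinal, columnaFinal):
--     n = len(laberinto)
--     m = len(laberinto[0])
--
--     DP = [[float('inf')] * m for _ in range(n)]
--     DP[filaInicial][columnaInicial] = 0
--
--     for i in range(n):
--         for j in range(m):
--             if laberinto[i][j] == 'pared':
--                 DP[i][j] = float('inf')
--             else:
--                 if i > 0:
--                     DP[i][j] = min(DP[i][j], DP[i-1][j] + 1)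
--                 if j > 0:
--                     DP[i][j] = min(DP[i][j], DP[i][j-1] + 1)
--
--     if DP[filaFinal][columnaFinal] == float('inf'):
--         return []  # No hay camino desde la posición inicial a la posición final
--
--     camino = []
--     i = filaFinal
--     j = columnaFinal
--
--     while i != filaInicial or j != columnaInicial:
--         camino.append((i, j))
--         if i > 0 and DP[i-1][j] < DP[i][j]:
--             i -= 1
--         else:
--             j -= 1
--
--     camino.append((filaInicial, columnaInicial))
--     camino.reverse()
--
--     return camino
-- ===== SOURCE B (Python) =====
-- def RecorridoLaberintoPD(laberinto, filaInicial, columnaInicial, filaFinal, columnaFinal):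
--     # Depth-first flood fill from the start over down/right moves (explicit
--     # stack, visits only the reachable region), then a backward walk from the
--     # goal preferring 'up' whenever the cell above was visited.
--     n = len(laberinto)
--     m = len(laberinto[0])
--
--     # early exits: a walled start or goal can never lie on a path
--     if laberinto[filaInicial][columnaInicial] == 'pared':
--         return []
--     if laberinto[filaFinal][columnaFinal] == 'pared':
--         return []
--
--     visitado = set()
--     pila = [(filaInicial, columnaInicial)]
--     while pila:
--         i, j = pila.pop()
--         if i < 0 or i >= n or j < 0 or j >= m:
--             continue
--         if (i, j) in visitado or laberinto[i][j] == 'pared':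
--             continue
--         visitado.add((i, j))
--         pila.append((i + 1, j))
--         pila.append((i, j + 1))
--
--     if (filaFinal, columnaFinal) not in visitado:
--         return []  # no path
--
--     camino = []
--     i, j = filaFinal, columnaFinal
--     while (i, j) != (filaInicial, columnaInicial):
--         camino = [(i, j)] + camino
--         if i > 0 and (i - 1, j) in visitado:
--             i -= 1
--         else:
--             j -= 1
--     return [(filaInicial, columnaInicial)] + camino
-- ===== Notes on version B (the rewrite author's own statement) =====
-- stated objective: alternative
-- what changed: B replaces A's bottom-up full-table distance DP (double loop over all n*m cells with float('inf')/min arithmetic) by two early wall checks plus a depth-first flood fill with an explicit stack from the start over down/right moves, which visits only the reachable region, and then walks back from the goal preferring 'up' whenever the cell above was visited, building the path front-to-back by prepending.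
-- outside the precondition, e.g. on RecorridoLaberintoPD([['.']], -1, 0, -1, 0): A returns [(-1, 0)], B returns []
import Mathlib
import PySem

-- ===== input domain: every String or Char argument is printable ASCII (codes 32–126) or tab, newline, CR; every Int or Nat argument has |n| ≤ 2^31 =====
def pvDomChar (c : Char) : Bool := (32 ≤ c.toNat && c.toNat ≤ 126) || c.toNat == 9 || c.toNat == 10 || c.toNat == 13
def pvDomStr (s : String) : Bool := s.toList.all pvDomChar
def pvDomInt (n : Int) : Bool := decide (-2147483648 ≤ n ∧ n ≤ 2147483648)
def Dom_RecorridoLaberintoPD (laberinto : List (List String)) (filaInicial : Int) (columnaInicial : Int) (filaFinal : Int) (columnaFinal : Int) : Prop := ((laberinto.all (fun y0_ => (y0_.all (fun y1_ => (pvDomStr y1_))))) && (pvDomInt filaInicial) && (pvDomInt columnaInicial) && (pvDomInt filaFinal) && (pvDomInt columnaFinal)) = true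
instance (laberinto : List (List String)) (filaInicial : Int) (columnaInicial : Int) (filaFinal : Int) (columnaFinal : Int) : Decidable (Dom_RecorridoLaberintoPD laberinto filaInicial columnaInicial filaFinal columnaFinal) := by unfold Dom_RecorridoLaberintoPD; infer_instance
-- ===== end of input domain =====

-- B replaces A's full-table distance DP by a depth-first flood fill (explicit
-- stack) from the start over down/right moves, plus a backward walk from the
-- goal preferring 'up' when the cell above was visited; objective: alternative.

-- ===== PORT A =====
-- Python floats here are only 0,1,2,… and float('inf'): modelled as Option Int with none = inf.
def optMin (a b : Option Int) : Option Int :=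
  match a, b with
  | none, b => b
  | some x, none => some x
  | some x, some y => some (min x y)

def optAdd1 : Option Int → Option Int
  | none => none
  | some x => some (x + 1)

def optLt : Option Int → Option Int → Bool
  | none, _ => false
  | some _, none => true
  | some x, some y => decide (x < y)

-- inner loop 'for j in range(m)': one DP row, left to right; 'up' walks the previous
-- row (length m), 'left' is the cell just written (DP[i][j-1]).
def fillRowA (rowS : List String) (i fi ci : Int) : List (Option Int) → Int → Option Int → List (Option Int)
  | [], _, _ => []
  | up :: prest, j, left =>
    let v0 : Option Int := if i = fi ∧ j = ci then some 0 else none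
    let v : Option Int :=
      if (PySem.List.pyGet? rowS j).getD "" = "pared" then none
      else
        let v1 := if 0 < i then optMin v0 (optAdd1 up) else v0
        if 0 < j then optMin v1 (optAdd1 left) else v1
    v :: fillRowA rowS i fi ci prest (j + 1) v

-- outer loop 'for i in range(n)': rows in order, each reading the finished previous row
def fillA (fi ci : Int) : List (List String) → Int → List (Option Int) → List (List (Option Int))
  | [], _, _ => []
  | r :: rest, i, prev =>
    let nr := fillRowA r i fi ci prev 0 none
    nr :: fillA fi ci rest (i + 1) nr

-- DP[i][j] (Python indexing; .getD only totalizes the out-of-range IndexError case)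
def dpAt (dp : List (List (Option Int))) (i j : Int) : Option Int :=
  ((PySem.List.pyGet? dp i).bind fun row => PySem.List.pyGet? row j).getD none

-- the reconstruction 'while' loop; fuel only totalizes it (none = fuel ran out,
-- which never happens under Pre_) — appends (i,j) first, exactly like A
def reconA (dp : List (List (Option Int))) (fi ci : Int) : Nat → Int → Int → List (Int × Int) → Option (List (Int × Int))
  | 0, _, _, _ => none
  | fuel + 1, i, j, acc =>
    if i = fi ∧ j = ci then some acc
    else
      if decide (0 < i) && optLt (dpAt dp (i-1) j) (dpAt dp i j)
      then reconA dp fi ci fuel (i-1) j (acc ++ [(i, j)])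
      else reconA dp fi ci fuel i (j-1) (acc ++ [(i, j)])

def RecorridoLaberintoPD (laberinto : List (List String)) (filaInicial : Int) (columnaInicial : Int) (filaFinal : Int) (columnaFinal : Int) : List (Int × Int) :=
  let n := laberinto.length
  let m := (laberinto.headD []).length
  let dp := fillA filaInicial columnaInicial laberinto 0 (List.replicate m none)
  if dpAt dp filaFinal columnaFinal = none then []
  else
    match reconA dp filaInicial columnaInicial (n + m + 2) filaFinal columnaFinal [] with
    | none => []
    | some camino => (camino ++ [(filaInicial, columnaInicial)]).reverse

-- ===== PORT B =====
-- Python B: depth-first flood fill from the start with an explicit stack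
-- ('pila'); the 'visitado' set is a PySem.Set; fuel only totalizes the while
-- loop (each pop consumes 1; pops ≤ 1 + 2·n·m, so fuel 2·n·m + 2 never runs out).
def dfsB (lab : List (List String)) (n m : Int) : Nat → List (Int × Int) → PySem.Set (Int × Int) → PySem.Set (Int × Int)
  | 0, _, vis => vis
  | _ + 1, [], vis => vis
  | fuel + 1, p :: pila, vis =>
    if p.1 < 0 ∨ n ≤ p.1 ∨ p.2 < 0 ∨ m ≤ p.2 then dfsB lab n m fuel pila vis
    else if p ∈ vis ∨ (PySem.List.pyGet? ((PySem.List.pyGet? lab p.1).getD []) p.2).getD "" = "pared" then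
      dfsB lab n m fuel pila vis
    else
      -- Python appends (i+1, j) then (i, j+1) and pops from the end
      dfsB lab n m fuel ((p.1, p.2 + 1) :: (p.1 + 1, p.2) :: pila) (PySem.Set.add vis p)

-- B's while loop: prepends the current cell, then moves (up if the cell above
-- was visited, else left); fuel totalizes it like reconA's.
def reconB (vis : PySem.Set (Int × Int)) (fi ci : Int) : Nat → Int → Int → List (Int × Int) → Option (List (Int × Int))
  | 0, _, _, _ => none
  | fuel + 1, i, j, camino =>
    if i = fi ∧ j = ci then some camino
    else
      let camino' := (i, j) :: camino
      if decide (0 < i) && decide ((i - 1, j) ∈ vis)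
      then reconB vis fi ci fuel (i-1) j camino'
      else reconB vis fi ci fuel i (j-1) camino'

def RecorridoLaberintoPD_alt (laberinto : List (List String)) (filaInicial : Int) (columnaInicial : Int) (filaFinal : Int) (columnaFinal : Int) : List (Int × Int) :=
  let n := laberinto.length
  let m := (laberinto.headD []).length
  -- early exits: a walled start or goal can never lie on a path
  if (PySem.List.pyGet? ((PySem.List.pyGet? laberinto filaInicial).getD []) columnaInicial).getD "" = "pared" then []
  else if (PySem.List.pyGet? ((PySem.List.pyGet? laberinto filaFinal).getD []) columnaFinal).getD "" = "pared" then []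
  else
    let vis := dfsB laberinto n m (2 * n * m + 2) [(filaInicial, columnaInicial)] PySem.Set.empty
    if (filaFinal, columnaFinal) ∈ vis then
      match reconB vis filaInicial columnaInicial (n + m + 2) filaFinal columnaFinal [] with
      | none => []
      | some camino => (filaInicial, columnaInicial) :: camino
    else []

-- ===== PRECONDITION & SPEC =====
-- Pre_ admits indices in Python's index range when all four are nonnegative, or when
-- A provably returns [] even under index wrapping: the (wrapped) start or goal cell is
-- a wall, or the goal lies above/left of the start, so the goal's DP entry stays inf.
-- It excludes rows shorter than row 0 and indices out of Python's range (A raises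
-- IndexError; on an empty maze len(laberinto[0]) raises), and the remaining
-- negative in-range indices, where A's wrapped table accesses make it raise, loop
-- forever, or return an accidental wrapped value such as [(-1, 0)] that B, comparing
-- indices directly, does not reproduce.
def Pre_RecorridoLaberintoPD (laberinto : List (List String)) (filaInicial : Int) (columnaInicial : Int) (filaFinal : Int) (columnaFinal : Int) : Prop :=
  -(laberinto.length : Int) ≤ filaInicial ∧ filaInicial < laberinto.length ∧
  -(laberinto.length : Int) ≤ filaFinal ∧ filaFinal < laberinto.length ∧
  -((laberinto.headD []).length : Int) ≤ columnaInicial ∧ columnaInicial < (laberinto.headD []).length ∧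
  -((laberinto.headD []).length : Int) ≤ columnaFinal ∧ columnaFinal < (laberinto.headD []).length ∧
  (∀ row ∈ laberinto, (laberinto.headD []).length ≤ row.length) ∧
  ((0 ≤ filaInicial ∧ 0 ≤ columnaInicial ∧ 0 ≤ filaFinal ∧ 0 ≤ columnaFinal) ∨
    (PySem.List.pyGet? ((PySem.List.pyGet? laberinto filaInicial).getD [])
      (if columnaInicial < 0 then columnaInicial + (laberinto.headD []).length else columnaInicial)).getD ""
      = "pared" ∨
    (PySem.List.pyGet? ((PySem.List.pyGet? laberinto filaFinal).getD [])
      (if columnaFinal < 0 then columnaFinal + (laberinto.headD []).length else columnaFinal)).getD ""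
      = "pared" ∨
    (if filaFinal < 0 then filaFinal + laberinto.length else filaFinal) <
      (if filaInicial < 0 then filaInicial + laberinto.length else filaInicial) ∨
    (if columnaFinal < 0 then columnaFinal + (laberinto.headD []).length else columnaFinal) <
      (if columnaInicial < 0 then columnaInicial + (laberinto.headD []).length else columnaInicial))
instance (laberinto : List (List String)) (filaInicial : Int) (columnaInicial : Int) (filaFinal : Int) (columnaFinal : Int) : Decidable (Pre_RecorridoLaberintoPD laberinto filaInicial columnaInicial filaFinal columnaFinal) := by unfold Pre_RecorridoLaberintoPD; infer_instance

def pvWitness_RecorridoLaberintoPD : List (List String) × Int × Int × Int × Int :=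
  ([[".", "."], ["pared", "."]], 0, 0, 1, 1)

def Spec_RecorridoLaberintoPD (laberinto : List (List String)) (filaInicial : Int) (columnaInicial : Int) (filaFinal : Int) (columnaFinal : Int) (out : List (Int × Int)) : Prop := out = RecorridoLaberintoPD_alt laberinto filaInicial columnaInicial filaFinal columnaFinal
instance (laberinto : List (List String)) (filaInicial : Int) (columnaInicial : Int) (filaFinal : Int) (columnaFinal : Int) (out : List (Int × Int)) : Decidable (Spec_RecorridoLaberintoPD laberinto filaInicial columnaInicial filaFinal columnaFinal out) := by unfold Spec_RecorridoLaberintoPD; infer_instance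

-- ===== CLAIM (what is proved, stated in full; the proofs are below) =====
def Claim_equal_RecorridoLaberintoPD : Prop := ∀ (laberinto : List (List String)) (filaInicial : Int) (columnaInicial : Int) (filaFinal : Int) (columnaFinal : Int), Dom_RecorridoLaberintoPD laberinto filaInicial columnaInicial filaFinal columnaFinal → Pre_RecorridoLaberintoPD laberinto filaInicial columnaInicial filaFinal columnaFinal → Spec_RecorridoLaberintoPD laberinto filaInicial columnaInicial filaFinal columnaFinal (RecorridoLaberintoPD laberinto filaInicial columnaInicial filaFinal columnaFinal)

-- ===== LEMMAS AND PROOFS =====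

-- Python indexing by physical offset
theorem pyGetPhys {α : Type} (xs : List α) (t : Int) :
    PySem.List.pyGet? xs t =
      (if 0 ≤ t then xs[t.toNat]?
       else if 0 ≤ t + xs.length then xs[(t + xs.length).toNat]? else none) := by
  simp only [PySem.List.pyGet?, PySem.List.pyIdx?]
  split_ifs with h1 h2 h3 h4 h5
  · simp
  · show (none : Option α) = xs[t.toNat]?
    exact (List.getElem?_eq_none (by omega)).symm
  · show xs[xs.length - (-t).toNat]? = xs[(t + xs.length).toNat]?
    congr 1; omega
  · omega
  · omega
  · simp

-- The mathematical recurrence both programs compute: a cell is reachable iff it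
-- is not a wall and is the start or has a reachable up/left neighbour.
def reachSpec (lab : List (List String)) (fi ci : Int) (i j : Int) : Bool :=
  if i < 0 ∨ j < 0 then false
  else if (PySem.List.pyGet? ((PySem.List.pyGet? lab i).getD []) j).getD "" = "pared" then false
  else if i = fi ∧ j = ci then true
  else ((if 0 < i then reachSpec lab fi ci (i-1) j else false)
        || (if 0 < j then reachSpec lab fi ci i (j-1) else false))
termination_by (i + j).toNat
decreasing_by all_goals omega

theorem reachSpec_neg (lab : List (List String)) (fi ci i j : Int) (h : i < 0 ∨ j < 0) :
    reachSpec lab fi ci i j = false := by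
  rw [reachSpec]; simp [h]

theorem reachSpec_nonwall (lab : List (List String)) (fi ci i j : Int)
    (h : reachSpec lab fi ci i j = true) :
    (PySem.List.pyGet? ((PySem.List.pyGet? lab i).getD []) j).getD "" ≠ "pared" := by
  rw [reachSpec] at h
  by_cases h1 : i < 0 ∨ j < 0
  · simp [h1] at h
  · by_cases h2 : (PySem.List.pyGet? ((PySem.List.pyGet? lab i).getD []) j).getD "" = "pared"
    · simp [h1, h2] at h
    · exact h2

-- every reachable cell lies weakly below/right of the start, the start is
-- in nonnegative coordinates, and the start cell is not a wall
theorem reachSpec_start (lab : List (List String)) (fi ci : Int) :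
    ∀ (k : Nat) (i j : Int), (i + j).toNat = k → reachSpec lab fi ci i j = true →
      0 ≤ fi ∧ 0 ≤ ci ∧ fi ≤ i ∧ ci ≤ j ∧
      (PySem.List.pyGet? ((PySem.List.pyGet? lab fi).getD []) ci).getD "" ≠ "pared" := by
  intro k
  induction k using Nat.strong_induction_on with
  | _ k ih =>
    intro i j hk h
    rw [reachSpec] at h
    by_cases h1 : i < 0 ∨ j < 0
    · simp [h1] at h
    · by_cases h2 : (PySem.List.pyGet? ((PySem.List.pyGet? lab i).getD []) j).getD "" = "pared"
      · simp [h1, h2] at h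
      · by_cases h3 : i = fi ∧ j = ci
        · obtain ⟨rfl, rfl⟩ := h3
          exact ⟨by omega, by omega, le_refl _, le_refl _, h2⟩
        · simp only [h1, h2, h3, if_false] at h
          rw [not_or] at h1
          rcases Bool.or_eq_true_iff.mp h with hu | hl
          · by_cases hi : 0 < i
            · rw [if_pos hi] at hu
              have := ih (i - 1 + j).toNat (by omega) (i-1) j rfl hu
              exact ⟨this.1, this.2.1, by omega, this.2.2.2.1, this.2.2.2.2⟩
            · rw [if_neg hi] at hu
              exact absurd hu (by simp)
          · by_cases hj : 0 < j
            · rw [if_pos hj] at hl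
              have := ih (i + (j - 1)).toNat (by omega) i (j-1) rfl hl
              exact ⟨this.1, this.2.1, this.2.2.1, by omega, this.2.2.2.2⟩
            · rw [if_neg hj] at hl
              exact absurd hl (by simp)

-- pointwise relation between a DP row of A (cells of row i at columns j, j+1, …)
-- and the recurrence: finite iff reachable, the finite value being i+j-fi-ci
def RowRelS (lab : List (List String)) (fi ci i : Int) : Int → List (Option Int) → Prop
  | _, [] => True
  | j, a :: as => (a = if reachSpec lab fi ci i j then some (i + j - fi - ci) else none) ∧
      RowRelS lab fi ci i (j+1) as

def TblRelS (lab : List (List String)) (fi ci : Int) (m : Nat) : Int → List (List (Option Int)) → Prop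
  | _, [] => True
  | i, a :: as => a.length = m ∧ RowRelS lab fi ci i 0 a ∧ TblRelS lab fi ci m (i+1) as

theorem replicate_relS (lab : List (List String)) (fi ci i : Int) (hi : i < 0) :
    ∀ (k : Nat) (j : Int), RowRelS lab fi ci i j (List.replicate k none) := by
  intro k
  induction k with
  | zero => intro j; simp [RowRelS]
  | succ t ihk =>
    intro j
    refine ⟨?_, by simpa [List.replicate] using ihk (j+1)⟩
    rw [reachSpec_neg lab fi ci i j (Or.inl hi)]
    simp

theorem fillRowA_len (rowS : List String) (i fi ci : Int) :
    ∀ (prevA : List (Option Int)) (j : Int) (leftA : Option Int),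
    (fillRowA rowS i fi ci prevA j leftA).length = prevA.length := by
  intro prevA
  induction prevA with
  | nil => intro j leftA; simp [fillRowA]
  | cons up prest ih => intro j leftA; simp [fillRowA, ih]

theorem fillRow_relS (lab : List (List String)) (rowS : List String) (i fi ci : Int)
    (hi : 0 ≤ i) (hrow : (PySem.List.pyGet? lab i).getD [] = rowS) :
    ∀ (prev : List (Option Int)) (j : Int), 0 ≤ j →
    RowRelS lab fi ci (i-1) j prev →
    ∀ (left : Option Int),
      left = (if reachSpec lab fi ci i (j-1) then some (i + (j-1) - fi - ci) else none) →
    RowRelS lab fi ci i j (fillRowA rowS i fi ci prev j left) := by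
  intro prev
  induction prev with
  | nil => intro j _ _ left _; simp [fillRowA, RowRelS]
  | cons up prest ihp =>
    intro j hj hrel left hleft
    obtain ⟨hup, hrest⟩ := hrel
    have hcell : (if (PySem.List.pyGet? rowS j).getD "" = "pared" then none
        else
          let v1 := if 0 < i then optMin (if i = fi ∧ j = ci then some 0 else none) (optAdd1 up)
                    else (if i = fi ∧ j = ci then some 0 else none)
          if 0 < j then optMin v1 (optAdd1 left) else v1) =
        (if reachSpec lab fi ci i j then some (i + j - fi - ci) else none) := by
      subst hup hleft
      conv_rhs => rw [reachSpec]
      rw [hrow]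
      have hg : ¬ (i < 0 ∨ j < 0) := by omega
      rw [if_neg hg]
      by_cases hw : (PySem.List.pyGet? rowS j).getD "" = "pared"
      · simp [hw]
      · by_cases hs : i = fi ∧ j = ci
        · obtain ⟨rfl, rfl⟩ := hs
          by_cases hi0 : 0 < i <;> by_cases hj0 : 0 < j <;>
            cases hbu : reachSpec lab i j (i-1) j <;>
            cases hbl : reachSpec lab i j i (j-1) <;>
            simp [optMin, optAdd1, hw, hi0, hj0, hbu, hbl] <;>
            omega
        · by_cases hi0 : 0 < i <;> by_cases hj0 : 0 < j <;>
            cases hbu : reachSpec lab fi ci (i-1) j <;>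
            cases hbl : reachSpec lab fi ci i (j-1) <;>
            simp [optMin, optAdd1, hw, hs, hi0, hj0, hbu, hbl] <;>
            omega
    refine ⟨hcell, ?_⟩
    exact ihp (j+1) (by omega) hrest _ (by simp only [add_sub_cancel_right]; exact hcell)

theorem fillA_len (fi ci : Int) :
    ∀ (rows : List (List String)) (i : Int) (prev : List (Option Int)),
    (fillA fi ci rows i prev).length = rows.length := by
  intro rows
  induction rows with
  | nil => intro i prev; simp [fillA]
  | cons r rest ih => intro i prev; simp [fillA, ih]

theorem fill_relS (lab : List (List String)) (fi ci : Int) (m : Nat) :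
    ∀ (rows : List (List String)) (i : Int) (prev : List (Option Int)),
    0 ≤ i →
    (∀ (k : Nat) (r : List String), rows[k]? = some r → (PySem.List.pyGet? lab (i+k)).getD [] = r) →
    RowRelS lab fi ci (i-1) 0 prev → prev.length = m →
    TblRelS lab fi ci m i (fillA fi ci rows i prev) := by
  intro rows
  induction rows with
  | nil => intro i prev _ _ _ _; simp [fillA, TblRelS]
  | cons rowS rest ih =>
    intro i prev hi hrows hrel hlen
    have hrow0 : (PySem.List.pyGet? lab i).getD [] = rowS := by
      have := hrows 0 rowS (by simp)
      simpa using this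
    have hrow := fillRow_relS lab rowS i fi ci hi hrow0 prev 0 (by omega) hrel none
      (by rw [reachSpec_neg lab fi ci i (0-1) (by omega)]; simp)
    have hlen' : (fillRowA rowS i fi ci prev 0 none).length = m := by
      rw [fillRowA_len]; exact hlen
    refine ⟨hlen', hrow, ?_⟩
    refine ih (i+1) _ (by omega) ?_ (by simpa using hrow) hlen'
    intro k r hk
    have := hrows (k+1) r (by simpa using hk)
    have harith : i + 1 + (k : Int) = i + ((k : Int) + 1) := by ring
    rw [harith]
    simpa [Nat.cast_add] using this

-- indexed access out of RowRelS
theorem rowRelS_get (lab : List (List String)) (fi ci i : Int) :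
    ∀ (j0 : Int) (a : List (Option Int)), RowRelS lab fi ci i j0 a →
    ∀ (k : Nat) (x : Option Int), a[k]? = some x →
    x = (if reachSpec lab fi ci i (j0 + k) then some (i + (j0 + k) - fi - ci) else none) := by
  intro j0 a
  induction a generalizing j0 with
  | nil => intro _ k x hx; simp at hx
  | cons z as ihz =>
    intro h k x hx
    obtain ⟨hz, hrest⟩ := h
    cases k with
    | zero =>
      simp only [List.getElem?_cons_zero, Option.some.injEq] at hx
      rw [← hx, hz]; norm_num
    | succ k' =>
      simp only [List.getElem?_cons_succ] at hx
      have := ihz (j0+1) hrest k' x hx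
      rw [this]
      have : j0 + 1 + (k' : Int) = j0 + ((k' : Int) + 1) := by ring
      rw [this]
      norm_num

theorem rowRelS_pyGet (lab : List (List String)) (fi ci i : Int)
    (a : List (Option Int)) (hR : RowRelS lab fi ci i 0 a) (j : Int) :
    (¬(-(a.length:Int) ≤ j ∧ j < a.length) ∧ PySem.List.pyGet? a j = none) ∨
    (∃ (c : Nat), c < a.length ∧ ((0 ≤ j ∧ j = (c:Int)) ∨ (j < 0 ∧ j + a.length = (c:Int))) ∧
      PySem.List.pyGet? a j = some (if reachSpec lab fi ci i c then some (i + c - fi - ci) else none)) := by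
  rw [pyGetPhys]
  by_cases h0 : 0 ≤ j
  · rcases hx : a[j.toNat]? with _ | x
    · left
      have : a.length ≤ j.toNat := by
        by_contra hlt
        exact absurd hx (by simp [List.getElem?_eq_getElem (by omega : j.toNat < a.length)])
      exact ⟨by omega, by simp [h0, hx]⟩
    · right
      obtain ⟨hk, -⟩ := List.getElem?_eq_some_iff.mp hx
      have hv := rowRelS_get lab fi ci i 0 a hR j.toNat x hx
      refine ⟨j.toNat, hk, Or.inl ⟨h0, by omega⟩, ?_⟩
      simp only [if_pos h0, hx, hv]; norm_num
  · by_cases h1 : 0 ≤ j + a.length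
    · rcases hx : a[(j + a.length).toNat]? with _ | x
      · exfalso
        have : a.length ≤ (j + a.length).toNat := by
          by_contra hlt
          exact absurd hx (by simp [List.getElem?_eq_getElem (by omega : (j + a.length).toNat < a.length)])
        omega
      · right
        obtain ⟨hk, -⟩ := List.getElem?_eq_some_iff.mp hx
        have hv := rowRelS_get lab fi ci i 0 a hR (j + a.length).toNat x hx
        refine ⟨(j + a.length).toNat, hk, Or.inr ⟨by omega, by omega⟩, ?_⟩
        simp only [if_neg h0, if_pos h1, hx, hv]; norm_num
    · left
      exact ⟨by omega, by simp [h0, h1]⟩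

theorem tblRelS_get (lab : List (List String)) (fi ci : Int) (m : Nat) :
    ∀ (i0 : Int) (dp : List (List (Option Int))), TblRelS lab fi ci m i0 dp →
    ∀ (k : Nat) (ra : List (Option Int)), dp[k]? = some ra →
    ra.length = m ∧ RowRelS lab fi ci (i0 + k) 0 ra := by
  intro i0 dp
  induction dp generalizing i0 with
  | nil => intro _ k ra hk; simp at hk
  | cons a as ihd =>
    intro h k ra hk
    obtain ⟨hlen, hrow, hrest⟩ := h
    cases k with
    | zero =>
      simp only [List.getElem?_cons_zero, Option.some.injEq] at hk
      subst hk
      exact ⟨hlen, by simpa using hrow⟩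
    | succ k' =>
      simp only [List.getElem?_cons_succ] at hk
      obtain ⟨hl, hr⟩ := ihd (i0+1) hrest k' ra hk
      refine ⟨hl, ?_⟩
      have : i0 + 1 + (k' : Int) = i0 + ((k' : Int) + 1) := by ring
      rw [this] at hr
      simpa [Nat.cast_add] using hr

-- Python's DP[t][u] (both indices possibly wrapped), characterized by the recurrence
theorem tblRelS_pyGet (lab : List (List String)) (fi ci : Int) (m : Nat)
    (dp : List (List (Option Int))) (hT : TblRelS lab fi ci m 0 dp) (t u : Int) :
    (¬((-(dp.length:Int) ≤ t ∧ t < dp.length) ∧ (-(m:Int) ≤ u ∧ u < m)) ∧ dpAt dp t u = none) ∨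
    (∃ (a c : Nat), a < dp.length ∧ c < m ∧
      ((0 ≤ t ∧ t = (a:Int)) ∨ (t < 0 ∧ t + dp.length = (a:Int))) ∧
      ((0 ≤ u ∧ u = (c:Int)) ∨ (u < 0 ∧ u + (m:Int) = (c:Int))) ∧
      dpAt dp t u = (if reachSpec lab fi ci a c then some ((a:Int) + (c:Int) - fi - ci) else none)) := by
  unfold dpAt
  rw [pyGetPhys]
  by_cases h0 : 0 ≤ t
  · rcases hx : dp[t.toNat]? with _ | ra
    · left
      have : dp.length ≤ t.toNat := by
        by_contra hlt
        exact absurd hx (by simp [List.getElem?_eq_getElem (by omega : t.toNat < dp.length)])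
      exact ⟨by omega, by simp [h0, hx]⟩
    · obtain ⟨hk, -⟩ := List.getElem?_eq_some_iff.mp hx
      obtain ⟨hlm, hrow⟩ := tblRelS_get lab fi ci m 0 dp hT t.toNat ra hx
      rcases rowRelS_pyGet lab fi ci (t.toNat : Int) ra (by simpa using hrow) u with ⟨hout, hnone⟩ | ⟨c, hc, hcidx, hcv⟩
      · left
        exact ⟨by omega, by simp [h0, hx, hnone]⟩
      · right
        refine ⟨t.toNat, c, hk, by omega, Or.inl ⟨h0, by omega⟩, ?_, ?_⟩
        · rcases hcidx with ⟨hb1, hb2⟩ | ⟨hb1, hb2⟩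
          · exact Or.inl ⟨hb1, hb2⟩
          · exact Or.inr ⟨hb1, by omega⟩
        · simp [h0, hx, hcv]
  · by_cases h1 : 0 ≤ t + dp.length
    · rcases hx : dp[(t + dp.length).toNat]? with _ | ra
      · left
        have : dp.length ≤ (t + dp.length).toNat := by
          by_contra hlt
          exact absurd hx (by simp [List.getElem?_eq_getElem (by omega : (t + dp.length).toNat < dp.length)])
        exact ⟨by omega, by simp [h0, h1, hx]⟩
      · obtain ⟨hk, -⟩ := List.getElem?_eq_some_iff.mp hx
        obtain ⟨hlm, hrow⟩ := tblRelS_get lab fi ci m 0 dp hT (t + dp.length).toNat ra hx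
        rcases rowRelS_pyGet lab fi ci ((t + dp.length).toNat : Int) ra (by simpa using hrow) u with ⟨hout, hnone⟩ | ⟨c, hc, hcidx, hcv⟩
        · left
          exact ⟨by omega, by simp [h0, h1, hx, hnone]⟩
        · right
          refine ⟨(t + dp.length).toNat, c, hk, by omega, Or.inr ⟨by omega, by omega⟩, ?_, ?_⟩
          · rcases hcidx with ⟨hb1, hb2⟩ | ⟨hb1, hb2⟩
            · exact Or.inl ⟨hb1, hb2⟩
            · exact Or.inr ⟨hb1, by omega⟩
          · simp [h0, h1, hx, hcv]
    · left
      exact ⟨by omega, by simp [h0, h1]⟩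

-- ===== DFS correctness =====

def okCell (lab : List (List String)) (n m : Int) (p : Int × Int) : Prop :=
  0 ≤ p.1 ∧ p.1 < n ∧ 0 ≤ p.2 ∧ p.2 < m ∧
  (PySem.List.pyGet? ((PySem.List.pyGet? lab p.1).getD []) p.2).getD "" ≠ "pared"

def Succ (p s : Int × Int) : Prop := s = (p.1 + 1, p.2) ∨ s = (p.1, p.2 + 1)

theorem reachSpec_succ (lab : List (List String)) (fi ci : Int) (p s : Int × Int)
    (hp1 : 0 ≤ p.1) (hp2 : 0 ≤ p.2)
    (hspec : reachSpec lab fi ci p.1 p.2 = true)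
    (hw : (PySem.List.pyGet? ((PySem.List.pyGet? lab s.1).getD []) s.2).getD "" ≠ "pared")
    (hs : Succ p s) : reachSpec lab fi ci s.1 s.2 = true := by
  rcases hs with h | h <;> subst h <;> rw [reachSpec]
  · have hg : ¬ (p.1 + 1 < 0 ∨ p.2 < 0) := by omega
    simp only [hg, if_false, hw, if_neg, if_false]
    by_cases hst : p.1 + 1 = fi ∧ p.2 = ci
    · simp [hst]
    · simp only [hst, if_false]
      have : (0:Int) < p.1 + 1 := by omega
      simp only [this, if_true, add_sub_cancel_right, hspec, Bool.true_or]
  · have hg : ¬ (p.1 < 0 ∨ p.2 + 1 < 0) := by omega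
    simp only [hg, if_false, hw, if_neg, if_false]
    by_cases hst : p.1 = fi ∧ p.2 + 1 = ci
    · simp [hst]
    · simp only [hst, if_false]
      have : (0:Int) < p.2 + 1 := by omega
      simp only [this, if_true, add_sub_cancel_right, hspec, Bool.or_true]

theorem nodup_ok_length (lab : List (List String)) (n m : Int) (vis : List (Int × Int))
    (hnd : vis.Nodup) (hok : ∀ p ∈ vis, okCell lab n m p) :
    vis.length ≤ n.toNat * m.toNat := by
  have hsub : vis.toFinset ⊆ Finset.Ico (0:Int) n ×ˢ Finset.Ico (0:Int) m := by
    intro p hp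
    have := hok p (List.mem_toFinset.mp hp)
    obtain ⟨h1, h2, h3, h4, -⟩ := this
    simp [Finset.mem_product, Finset.mem_Ico]
    exact ⟨⟨h1, h2⟩, h3, h4⟩
  have hcard := Finset.card_le_card hsub
  rw [List.toFinset_card_of_nodup hnd] at hcard
  rw [Finset.card_product, Int.card_Ico, Int.card_Ico] at hcard
  simpa using hcard

theorem set_add_eq_append {α : Type} [BEq α] [LawfulBEq α] (s : List α) (x : α) (h : x ∉ s) :
    PySem.Set.add s x = s ++ [x] := by
  unfold PySem.Set.add PySem.Set.contains
  simp [List.contains_eq_mem, h]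

-- main DFS invariant: the result is sound (visited cells are in-range and
-- reachable), closed under ok successors, and contains the start if it is ok
theorem dfs_main (lab : List (List String)) (fi ci n m : Int) :
    ∀ (fuel : Nat) (stack vis : List (Int × Int)),
    vis.Nodup →
    (∀ p ∈ vis, okCell lab n m p ∧ reachSpec lab fi ci p.1 p.2 = true) →
    (∀ p ∈ vis, ∀ s, Succ p s → okCell lab n m s → s ∈ vis ∨ s ∈ stack) →
    ((fi, ci) ∈ vis ∨ (fi, ci) ∈ stack ∨ ¬ okCell lab n m (fi, ci)) →
    (∀ p ∈ stack, p = (fi, ci) ∨ ∃ q ∈ vis, Succ q p) →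
    stack.length + 2 * (n.toNat * m.toNat - vis.length) < fuel →
    (∀ p ∈ dfsB lab n m fuel stack vis, okCell lab n m p ∧ reachSpec lab fi ci p.1 p.2 = true) ∧
    (∀ p ∈ dfsB lab n m fuel stack vis, ∀ s, Succ p s → okCell lab n m s → s ∈ dfsB lab n m fuel stack vis) ∧
    ((fi, ci) ∈ dfsB lab n m fuel stack vis ∨ ¬ okCell lab n m (fi, ci)) := by
  intro fuel
  induction fuel with
  | zero => intro stack vis _ _ _ _ _ hf; omega
  | succ f ihf =>
    intro stack vis hnd hS1 hS2 hS3 hS4 hf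
    cases stack with
    | nil =>
      have hd : dfsB lab n m (f+1) [] vis = vis := by simp [dfsB]
      rw [hd]
      refine ⟨hS1, ?_, ?_⟩
      · intro p hp s hsucc hok
        rcases hS2 p hp s hsucc hok with h | h
        · exact h
        · simp at h
      · rcases hS3 with h | h | h
        · exact Or.inl h
        · simp at h
        · exact Or.inr h
    | cons p pila =>
      by_cases hb : p.1 < 0 ∨ n ≤ p.1 ∨ p.2 < 0 ∨ m ≤ p.2
      · have hd : dfsB lab n m (f+1) (p :: pila) vis = dfsB lab n m f pila vis := by
          simp [dfsB, hb]
        rw [hd]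
        have hnok : ¬ okCell lab n m p := by
          unfold okCell; omega
        refine ihf pila vis hnd hS1 ?_ ?_ ?_ (by simp at hf ⊢; omega)
        · intro q hq s hsucc hok
          rcases hS2 q hq s hsucc hok with h | h
          · exact Or.inl h
          · rcases List.mem_cons.mp h with rfl | h
            · exact absurd hok hnok
            · exact Or.inr h
        · rcases hS3 with h | h | h
          · exact Or.inl h
          · rcases List.mem_cons.mp h with rfl | h
            · exact Or.inr (Or.inr hnok)
            · exact Or.inr (Or.inl h)
          · exact Or.inr (Or.inr h)
        · intro q hq; exact hS4 q (List.mem_cons_of_mem _ hq)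
      · by_cases hv : p ∈ vis ∨ (PySem.List.pyGet? ((PySem.List.pyGet? lab p.1).getD []) p.2).getD "" = "pared"
        · have hd : dfsB lab n m (f+1) (p :: pila) vis = dfsB lab n m f pila vis := by
            simp only [dfsB, if_neg hb, if_pos hv]
          rw [hd]
          refine ihf pila vis hnd hS1 ?_ ?_ ?_ (by simp at hf ⊢; omega)
          · intro q hq s hsucc hok
            rcases hS2 q hq s hsucc hok with h | h
            · exact Or.inl h
            · rcases List.mem_cons.mp h with rfl | h
              · rcases hv with hv | hv
                · exact Or.inl hv
                · exact absurd hv hok.2.2.2.2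
              · exact Or.inr h
          · rcases hS3 with h | h | h
            · exact Or.inl h
            · rcases List.mem_cons.mp h with rfl | h
              · rcases hv with hv | hv
                · exact Or.inl hv
                · exact Or.inr (Or.inr (fun hok => hok.2.2.2.2 hv))
              · exact Or.inr (Or.inl h)
            · exact Or.inr (Or.inr h)
          · intro q hq; exact hS4 q (List.mem_cons_of_mem _ hq)
        · have hb' : 0 ≤ p.1 ∧ p.1 < n ∧ 0 ≤ p.2 ∧ p.2 < m := by
            push_neg at hb; omega
          have hv' : p ∉ vis ∧ (PySem.List.pyGet? ((PySem.List.pyGet? lab p.1).getD []) p.2).getD "" ≠ "pared" := by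
            push_neg at hv; exact hv
          obtain ⟨hpv, hpw⟩ := hv'
          have hokp : okCell lab n m p := ⟨hb'.1, hb'.2.1, hb'.2.2.1, hb'.2.2.2, hpw⟩
          have hspecp : reachSpec lab fi ci p.1 p.2 = true := by
            rcases hS4 p (List.mem_cons_self) with rfl | ⟨q, hq, hsucc⟩
            · rw [reachSpec]
              have hg : ¬ (fi < 0 ∨ ci < 0) := by
                simp only [not_or, not_lt]
                exact ⟨hb'.1, hb'.2.2.1⟩
              simp [hg, hpw]
            · obtain ⟨hokq, hspecq⟩ := hS1 q hq
              exact reachSpec_succ lab fi ci q p hokq.1 hokq.2.2.1 hspecq hpw hsucc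
          have hadd : PySem.Set.add vis p = vis ++ [p] := set_add_eq_append vis p hpv
          have hd : dfsB lab n m (f+1) (p :: pila) vis =
              dfsB lab n m f ((p.1, p.2 + 1) :: (p.1 + 1, p.2) :: pila) (vis ++ [p]) := by
            simp only [dfsB, if_neg hb, if_neg hv, hadd]
          rw [hd]
          have hnd' : (vis ++ [p]).Nodup := by
            simp [List.nodup_append, hnd]
            intro a b hab hep
            exact hpv (hep ▸ hab)
          have hS1' : ∀ q ∈ vis ++ [p], okCell lab n m q ∧ reachSpec lab fi ci q.1 q.2 = true := by
            intro q hq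
            rcases List.mem_append.mp hq with h | h
            · exact hS1 q h
            · simp at h; subst h; exact ⟨hokp, hspecp⟩
          have hcnt : vis.length + 1 ≤ n.toNat * m.toNat := by
            have := nodup_ok_length lab n m (vis ++ [p]) hnd' (fun q hq => (hS1' q hq).1)
            simpa using this
          refine ihf _ (vis ++ [p]) hnd' hS1' ?_ ?_ ?_ ?_
          · intro q hq s hsucc hok
            rcases List.mem_append.mp hq with h | h
            · rcases hS2 q h s hsucc hok with h2 | h2
              · exact Or.inl (List.mem_append.mpr (Or.inl h2))
              · rcases List.mem_cons.mp h2 with rfl | h2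
                · exact Or.inl (List.mem_append.mpr (Or.inr (by simp)))
                · exact Or.inr (by simp [h2])
            · simp at h; subst h
              rcases hsucc with h | h <;> subst h <;> simp
          · rcases hS3 with h | h | h
            · exact Or.inl (List.mem_append.mpr (Or.inl h))
            · rcases List.mem_cons.mp h with rfl | h
              · exact Or.inl (List.mem_append.mpr (Or.inr (by simp)))
              · exact Or.inr (Or.inl (by simp [h]))
            · exact Or.inr (Or.inr h)
          · intro q hq
            rcases List.mem_cons.mp hq with rfl | hq
            · exact Or.inr ⟨p, List.mem_append.mpr (Or.inr (by simp)), Or.inr rfl⟩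
            · rcases List.mem_cons.mp hq with rfl | hq
              · exact Or.inr ⟨p, List.mem_append.mpr (Or.inr (by simp)), Or.inl rfl⟩
              · rcases hS4 q (List.mem_cons_of_mem _ hq) with h | ⟨r, hr, hs⟩
                · exact Or.inl h
                · exact Or.inr ⟨r, List.mem_append.mpr (Or.inl hr), hs⟩
          · simp at hf ⊢; omega

-- the visited set of the top-level DFS call is exactly the in-range reachable cells
theorem mem_dfs_iff (lab : List (List String)) (fi ci : Int) :
    ∀ (i j : Int),
      ((i, j) ∈ dfsB lab (lab.length : Int) ((lab.headD []).length : Int)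
          (2 * lab.length * (lab.headD []).length + 2) [(fi, ci)] PySem.Set.empty) ↔
      (0 ≤ i ∧ i < (lab.length : Int) ∧ 0 ≤ j ∧ j < ((lab.headD []).length : Int) ∧
        reachSpec lab fi ci i j = true) := by
  have hmain := dfs_main lab fi ci (lab.length : Int) ((lab.headD []).length : Int)
    (2 * lab.length * (lab.headD []).length + 2) [(fi, ci)] []
    (by simp) (by simp) (by simp) (by simp) (by simp)
    (by simp [Int.toNat_natCast, Nat.mul_assoc]; omega)
  obtain ⟨hsound, hclosed, hstart⟩ := hmain
  intro i j
  constructor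
  · intro hmem
    obtain ⟨hok, hspec⟩ := hsound (i, j) hmem
    exact ⟨hok.1, hok.2.1, hok.2.2.1, hok.2.2.2.1, hspec⟩
  · rintro ⟨h1, h2, h3, h4, hspec⟩
    have hcomp : ∀ (k : Nat) (i j : Int), (i + j).toNat = k →
        0 ≤ i → i < (lab.length : Int) → 0 ≤ j → j < ((lab.headD []).length : Int) →
        reachSpec lab fi ci i j = true →
        (i, j) ∈ dfsB lab (lab.length : Int) ((lab.headD []).length : Int)
          (2 * lab.length * (lab.headD []).length + 2) [(fi, ci)] PySem.Set.empty := by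
      intro k
      induction k using Nat.strong_induction_on with
      | _ k ih =>
        intro i j hk h1 h2 h3 h4 hspec
        have hw := reachSpec_nonwall lab fi ci i j hspec
        rw [reachSpec] at hspec
        rw [if_neg (by omega : ¬(i < 0 ∨ j < 0))] at hspec
        rw [if_neg hw] at hspec
        by_cases hst : i = fi ∧ j = ci
        · obtain ⟨rfl, rfl⟩ := hst
          rcases hstart with hmem | hnok
          · exact hmem
          · exact absurd ⟨h1, h2, h3, h4, hw⟩ hnok
        · rw [if_neg hst] at hspec
          rcases Bool.or_eq_true_iff.mp hspec with hu | hl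
          · by_cases hi0 : 0 < i
            · rw [if_pos hi0] at hu
              have hm := ih (i - 1 + j).toNat (by omega) (i-1) j rfl (by omega) (by omega) h3 h4 hu
              have hsucc : Succ (i-1, j) (i, j) := by
                left
                have : i - 1 + 1 = i := by omega
                simp [this]
              exact hclosed (i-1, j) hm (i, j) hsucc ⟨h1, h2, h3, h4, hw⟩
            · rw [if_neg hi0] at hu
              exact absurd hu (by simp)
          · by_cases hj0 : 0 < j
            · rw [if_pos hj0] at hl
              have hm := ih (i + (j - 1)).toNat (by omega) i (j-1) rfl h1 h2 (by omega) (by omega) hl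
              have hsucc : Succ (i, j-1) (i, j) := by
                right
                have : j - 1 + 1 = j := by omega
                simp [this]
              exact hclosed (i, j-1) hm (i, j) hsucc ⟨h1, h2, h3, h4, hw⟩
            · rw [if_neg hj0] at hl
              exact absurd hl (by simp)
    exact hcomp (i + j).toNat i j rfl h1 h2 h3 h4 hspec

-- A's DP entry at an in-range cell is exactly the recurrence value
theorem dpAt_inrange (lab : List (List String)) (fi ci : Int) (m : Nat)
    (dp : List (List (Option Int))) (hT : TblRelS lab fi ci m 0 dp) :
    ∀ (i j : Int), 0 ≤ i → i < (dp.length : Int) → 0 ≤ j → j < (m : Int) →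
    dpAt dp i j = (if reachSpec lab fi ci i j then some (i + j - fi - ci) else none) := by
  intro i j h1 h2 h3 h4
  rcases tblRelS_pyGet lab fi ci m dp hT i j with ⟨hout, hnone⟩ | ⟨a, c, ha, hc, hia, hjc, hval⟩
  · exact absurd ⟨⟨by omega, h2⟩, by omega, h4⟩ hout
  · have hEa : (a : Int) = i := by rcases hia with ⟨-, h⟩ | ⟨h, -⟩ <;> omega
    have hEc : (c : Int) = j := by rcases hjc with ⟨-, h⟩ | ⟨h, -⟩ <;> omega
    rw [hval, hEa, hEc]

-- the two reconstruction loops walk in lockstep over reachable cells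
theorem recon_rel (lab : List (List String)) (fi ci : Int)
    (dp : List (List (Option Int))) (V : List (Int × Int))
    (hT : TblRelS lab fi ci (lab.headD []).length 0 dp) (hdpl : dp.length = lab.length)
    (hV : ∀ i j : Int, ((i, j) ∈ V) ↔ (0 ≤ i ∧ i < (lab.length : Int) ∧ 0 ≤ j ∧
      j < ((lab.headD []).length : Int) ∧ reachSpec lab fi ci i j = true)) :
    ∀ (fuel : Nat) (i j : Int), 0 ≤ i → i < (lab.length : Int) → 0 ≤ j →
      j < ((lab.headD []).length : Int) → reachSpec lab fi ci i j = true →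
      ∀ (accA accB : List (Int × Int)), accB = accA.reverse →
      (reconA dp fi ci fuel i j accA).map (fun l => (l ++ [(fi, ci)]).reverse) =
      (reconB V fi ci fuel i j accB).map (fun c => (fi, ci) :: c) := by
  intro fuel
  induction fuel with
  | zero => intros; simp [reconA, reconB]
  | succ f ihf =>
    intro i j h1 h2 h3 h4 hspec accA accB hacc
    by_cases hst : i = fi ∧ j = ci
    · simp [reconA, reconB, hst, hacc]
    · have hdpij : dpAt dp i j = some (i + j - fi - ci) := by
        rw [dpAt_inrange lab fi ci (lab.headD []).length dp hT i j h1 (by omega) h3 h4,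
          if_pos hspec]
      have hcond : (decide (0 < i) && optLt (dpAt dp (i-1) j) (dpAt dp i j)) =
                   (decide (0 < i) && decide ((i - 1, j) ∈ V)) := by
        by_cases hi0 : 0 < i
        · have hup := dpAt_inrange lab fi ci (lab.headD []).length dp hT (i-1) j
            (by omega) (by omega) h3 h4
          rw [hdpij, hup]
          by_cases hu : reachSpec lab fi ci (i-1) j = true
          · rw [if_pos hu]
            have hmem : ((i-1, j) ∈ V) := (hV (i-1) j).mpr ⟨by omega, by omega, h3, h4, hu⟩
            simp [optLt, hmem, hi0] <;> omega
          · rw [if_neg hu]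
            have hmem : ¬ ((i-1, j) ∈ V) := fun hmm => hu ((hV (i-1) j).mp hmm).2.2.2.2
            simp [optLt, hmem]
        · simp [hi0]
      simp only [reconA, reconB, if_neg hst, hcond]
      by_cases hgo : (decide (0 < i) && decide ((i - 1, j) ∈ V)) = true
      · rw [if_pos hgo, if_pos hgo]
        have hi0 : 0 < i := by
          rcases Bool.and_eq_true_iff.mp hgo with ⟨h, -⟩
          exact of_decide_eq_true h
        have hmem : (i - 1, j) ∈ V := by
          rcases Bool.and_eq_true_iff.mp hgo with ⟨-, h⟩
          exact of_decide_eq_true h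
        have hspec' := ((hV (i-1) j).mp hmem).2.2.2.2
        exact ihf (i-1) j (by omega) (by omega) h3 h4 hspec' (accA ++ [(i, j)]) ((i, j) :: accB)
          (by simp [hacc])
      · rw [if_neg hgo, if_neg hgo]
        have hw := reachSpec_nonwall lab fi ci i j hspec
        rw [reachSpec, if_neg (by omega : ¬(i < 0 ∨ j < 0)), if_neg hw, if_neg hst] at hspec
        have hfirst : (if 0 < i then reachSpec lab fi ci (i-1) j else false) = false := by
          by_cases hi0 : 0 < i
          · rw [if_pos hi0]
            by_cases hu : reachSpec lab fi ci (i-1) j = true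
            · exfalso
              apply hgo
              have hmem : ((i-1, j) ∈ V) := (hV (i-1) j).mpr ⟨by omega, by omega, h3, h4, hu⟩
              simp [hi0, hmem]
            · simpa using hu
          · rw [if_neg hi0]
        rw [hfirst, Bool.false_or] at hspec
        have hj0 : 0 < j := by
          by_contra hj0
          rw [if_neg hj0] at hspec
          exact absurd hspec (by simp)
        rw [if_pos hj0] at hspec
        exact ihf i (j-1) h1 h2 (by omega) (by omega) hspec (accA ++ [(i, j)]) ((i, j) :: accB)
          (by simp [hacc])

theorem RecorridoLaberintoPD_spec : Claim_equal_RecorridoLaberintoPD := by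
  intro lab fi ci ff cf _ hpre
  obtain ⟨hb1, hb2, hb3, hb4, hb5, hb6, hb7, hb8, hrows, hdisj⟩ := hpre
  unfold Spec_RecorridoLaberintoPD RecorridoLaberintoPD RecorridoLaberintoPD_alt
  dsimp only
  have hT : TblRelS lab fi ci (lab.headD []).length 0
      (fillA fi ci lab 0 (List.replicate (lab.headD []).length none)) := by
    apply fill_relS lab fi ci (lab.headD []).length lab 0 _ le_rfl
    · intro k r hk
      have hE : ((0:Int) + (k:Int)) = (k:Int) := by omega
      rw [hE, pyGetPhys]
      simp [hk]
    · exact replicate_relS lab fi ci (0-1) (by omega) _ 0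
    · simp
  have hdpl : (fillA fi ci lab 0 (List.replicate (lab.headD []).length none)).length
      = lab.length := fillA_len fi ci lab 0 _
  have hViff := mem_dfs_iff lab fi ci
  rcases tblRelS_pyGet lab fi ci (lab.headD []).length _ hT ff cf with
    ⟨hout, hnone⟩ | ⟨a, c, ha, hc, hia, hjc, hval⟩
  · exfalso
    rw [hdpl] at hout
    exact hout ⟨⟨hb3, hb4⟩, hb7, hb8⟩
  · rw [hdpl] at ha hia
    by_cases hs : reachSpec lab fi ci (a : Int) (c : Int) = true
    · -- reachable goal cell: under Pre_ all indices must be nonnegative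
      have hstart := reachSpec_start lab fi ci ((a:Int) + (c:Int)).toNat (a:Int) (c:Int) rfl hs
      obtain ⟨h0fi, h0ci, hfa, hcc, hsw⟩ := hstart
      have hwrapc : (if cf < 0 then cf + ((lab.headD []).length : Int) else cf) = (c : Int) := by
        rcases hjc with ⟨hp, hq⟩ | ⟨hp, hq⟩
        · rw [if_neg (by omega)]; omega
        · rw [if_pos hp]; omega
      have hrowff : (PySem.List.pyGet? lab ff).getD [] = (PySem.List.pyGet? lab (a : Int)).getD [] := by
        rw [pyGetPhys, pyGetPhys]
        rcases hia with ⟨hp, hq⟩ | ⟨hp, hq⟩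
        · rw [if_pos hp, if_pos (by omega : (0:Int) ≤ (a:Int))]
          have hE : ff.toNat = a := by omega
          rw [hE, Int.toNat_natCast]
        · rw [if_neg (by omega), if_pos (by omega : (0:Int) ≤ ff + (lab.length:Int)),
            if_pos (by omega : (0:Int) ≤ (a:Int))]
          have hE : (ff + (lab.length:Int)).toNat = a := by omega
          rw [hE, Int.toNat_natCast]
      have hnw := reachSpec_nonwall lab fi ci (a:Int) (c:Int) hs
      have hall : 0 ≤ fi ∧ 0 ≤ ci ∧ 0 ≤ ff ∧ 0 ≤ cf := by
        rcases hdisj with h | h | h | h | h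
        · exact ⟨h0fi, h0ci, h.2.2.1, h.2.2.2⟩
        · exfalso
          rw [if_neg (by omega)] at h
          exact hsw h
        · exfalso
          rw [hwrapc, hrowff] at h
          exact hnw h
        · exfalso
          rw [if_neg (by omega : ¬ fi < 0)] at h
          have hEa : (if ff < 0 then ff + (lab.length:Int) else ff) = (a : Int) := by
            rcases hia with ⟨hp, hq⟩ | ⟨hp, hq⟩
            · rw [if_neg (by omega)]; omega
            · rw [if_pos hp]; omega
          rw [hEa] at h
          omega
        · exfalso
          rw [if_neg (by omega : ¬ ci < 0), hwrapc] at h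
          omega
      have hEa : (a : Int) = ff := by rcases hia with ⟨-, h⟩ | ⟨h, -⟩ <;> omega
      have hEc : (c : Int) = cf := by rcases hjc with ⟨-, h⟩ | ⟨h, -⟩ <;> omega
      rw [hEa, hEc] at hs hnw
      rw [if_neg hsw, if_neg hnw]
      have hAsome : dpAt (fillA fi ci lab 0 (List.replicate (lab.headD []).length none)) ff cf
          = some (ff + cf - fi - ci) := by
        rw [hval, hEa, hEc, if_pos hs]
      have hmemV : (ff, cf) ∈ dfsB lab (lab.length : Int) ((lab.headD []).length : Int)
          (2 * lab.length * (lab.headD []).length + 2) [(fi, ci)] PySem.Set.empty :=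
        (hViff ff cf).mpr ⟨hall.2.2.1, hb4, hall.2.2.2, hb8, hs⟩
      rw [hAsome]
      rw [if_neg (by simp)]
      rw [if_pos hmemV]
      have hrec := recon_rel lab fi ci _ _ hT hdpl (fun i j => hViff i j)
        (lab.length + (lab.headD []).length + 2) ff cf hall.2.2.1 hb4 hall.2.2.2 hb8 hs
        [] [] rfl
      rcases hA : reconA (fillA fi ci lab 0 (List.replicate (lab.headD []).length none)) fi ci
          (lab.length + (lab.headD []).length + 2) ff cf [] with _ | camino
      · rw [hA] at hrec
        rcases hB : reconB (dfsB lab (lab.length : Int) ((lab.headD []).length : Int)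
            (2 * lab.length * (lab.headD []).length + 2) [(fi, ci)] PySem.Set.empty) fi ci
            (lab.length + (lab.headD []).length + 2) ff cf [] with _ | caminoB
        · rfl
        · rw [hB] at hrec
          simp at hrec
      · rw [hA] at hrec
        rcases hB : reconB (dfsB lab (lab.length : Int) ((lab.headD []).length : Int)
            (2 * lab.length * (lab.headD []).length + 2) [(fi, ci)] PySem.Set.empty) fi ci
            (lab.length + (lab.headD []).length + 2) ff cf [] with _ | caminoB
        · rw [hB] at hrec
          simp at hrec
        · rw [hB] at hrec
          simp only [Option.map_some, Option.some.injEq] at hrec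
          exact hrec
    · -- unreachable goal cell: A returns [] and every branch of B returns []
      have hAnone : dpAt (fillA fi ci lab 0 (List.replicate (lab.headD []).length none)) ff cf
          = none := by
        rw [hval, if_neg hs]
      rw [hAnone, if_pos rfl]
      by_cases hg1 : (PySem.List.pyGet? ((PySem.List.pyGet? lab fi).getD []) ci).getD "" = "pared"
      · rw [if_pos hg1]
      · rw [if_neg hg1]
        by_cases hg2 : (PySem.List.pyGet? ((PySem.List.pyGet? lab ff).getD []) cf).getD "" = "pared"
        · rw [if_pos hg2]
        · rw [if_neg hg2]
          have hnotV : ¬ ((ff, cf) ∈ dfsB lab (lab.length : Int) ((lab.headD []).length : Int)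
              (2 * lab.length * (lab.headD []).length + 2) [(fi, ci)] PySem.Set.empty) := by
            intro hmm
            obtain ⟨hq1, hq2, hq3, hq4, hq5⟩ := (hViff ff cf).mp hmm
            have hEa : (a : Int) = ff := by rcases hia with ⟨-, h⟩ | ⟨h, -⟩ <;> omega
            have hEc : (c : Int) = cf := by rcases hjc with ⟨-, h⟩ | ⟨h, -⟩ <;> omega
            rw [hEa, hEc] at hs
            exact hs hq5
          rw [if_neg hnotV]
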